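-- pv_equiv track=rewrite | github.com/Ulixes-8/Novel-Proximity-Based-Exploration-Bonus-for-Multi-Agent-Reinforcement-Learning | nrl985-master/code/analysis/network_topologies_analysis.py | ring_graph
-- ===== SOURCE A (Python) =====
-- def ring_graph(num_of_agents, k):
--
--     """
--     Creates a ring graph adjacency table
--     num_of_agents - The number of agents
--     k - The number of agents left or right to be close neighbours.  k = 1 means a ring graph of degree 2, k = 2, degree 4 etc.
--
--     Return a ring graph adjacency table of degree k*2.
--
--     """
--
--     adj = []
--
--     for i in range(num_of_agents):
--         neighbours = []
--         for j in range(num_of_agents):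
--             found = False
--             for neighbour in range(1, k+1):
--                 if j == (i-neighbour)%num_of_agents or j == (i+neighbour)%num_of_agents:
--                     neighbours.append(1)
--                     found =True
--                     break
--
--             if not found:
--                 neighbours.append(0)
--         adj.append(neighbours)
--
--     return adj
-- ===== SOURCE B (Python) =====
-- def ring_graph(num_of_agents, k):
--     """Zero row per agent, then directly mark the 2k ring-neighbour indices.
--     Offsets repeat modulo num_of_agents, so capping them at num_of_agents
--     marks exactly the same entries."""
--     adj = []
--     for i in range(num_of_agents):
--         row = [0] * num_of_agents
--         for d in range(1, min(k, num_of_agents) + 1):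
--             row[(i - d) % num_of_agents] = 1
--             row[(i + d) % num_of_agents] = 1
--         adj.append(row)
--     return adj
-- ===== Notes on version B (the rewrite author's own statement) =====
-- stated objective: faster
-- what changed: Instead of testing every (i,j) pair against all k neighbour offsets (three nested loops), B builds each row as a zero list and directly sets the 2k neighbour indices (i±d) mod n to 1.
import Mathlib
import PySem

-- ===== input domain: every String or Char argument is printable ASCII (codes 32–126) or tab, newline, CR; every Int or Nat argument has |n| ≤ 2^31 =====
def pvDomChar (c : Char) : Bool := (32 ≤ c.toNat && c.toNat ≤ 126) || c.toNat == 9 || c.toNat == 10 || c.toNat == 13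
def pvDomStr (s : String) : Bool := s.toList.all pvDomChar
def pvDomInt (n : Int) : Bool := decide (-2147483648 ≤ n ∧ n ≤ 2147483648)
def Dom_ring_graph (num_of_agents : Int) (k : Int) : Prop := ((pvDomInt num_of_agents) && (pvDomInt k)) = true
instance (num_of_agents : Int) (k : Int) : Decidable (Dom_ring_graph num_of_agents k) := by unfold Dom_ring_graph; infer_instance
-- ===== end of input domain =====

-- B replaces A's triple loop (test every (i,j) against all k offsets) by zeroing each row
-- and directly setting the 2k neighbour indices; proved to return the same matrix.

-- ===== PORT A =====
-- A's innermost 'for neighbour in range(1, k+1): if …: append 1; found = True; break'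
-- loop, iterated lazily like Python's range: d counts up from 1 to k, stopping at the
-- first match (the break is the early 'true').
def ringFoundA (i j n k d : Int) : Bool :=
  if _h : d ≤ k then
    if j = PySem.Int.mod (i - d) n ∨ j = PySem.Int.mod (i + d) n then true
    else ringFoundA i j n k (d + 1)
  else false
termination_by (k + 1 - d).toNat
decreasing_by omega

def ring_graph (num_of_agents : Int) (k : Int) : List (List Int) :=
  (PySem.List.pyRange 0 num_of_agents 1).foldl (fun adj i =>
    adj ++ [(PySem.List.pyRange 0 num_of_agents 1).foldl (fun neighbours j =>
      if ringFoundA i j num_of_agents k 1 then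
        neighbours ++ [1]
      else
        neighbours ++ [0]) []]) []

-- ===== PORT B =====
def ring_graph_alt (num_of_agents : Int) (k : Int) : List (List Int) :=
  (PySem.List.pyRange 0 num_of_agents 1).foldl (fun adj i =>
    adj ++ [(PySem.List.pyRange 1 (min k num_of_agents + 1) 1).foldl (fun row d =>
      -- row[(i-d) % n] = 1; row[(i+d) % n] = 1 — the index is in [0, n) (mod of a
      -- positive divisor), so List.set at its .toNat is exact for Python's assignment
      (row.set (PySem.Int.mod (i - d) num_of_agents).toNat 1).set
        (PySem.Int.mod (i + d) num_of_agents).toNat 1)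
      (List.replicate num_of_agents.toNat 0)]) []

-- ===== PRECONDITION & SPEC =====
def Spec_ring_graph (num_of_agents : Int) (k : Int) (out : List (List Int)) : Prop := out = ring_graph_alt num_of_agents k
instance (num_of_agents : Int) (k : Int) (out : List (List Int)) : Decidable (Spec_ring_graph num_of_agents k out) := by unfold Spec_ring_graph; infer_instance

-- ===== CLAIM (what is proved, stated in full; the proofs are below) =====
def Claim_equal_ring_graph : Prop := ∀ (num_of_agents : Int) (k : Int), Dom_ring_graph num_of_agents k → Spec_ring_graph num_of_agents k (ring_graph num_of_agents k)

-- ===== LEMMAS AND PROOFS =====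

-- A's found-flag loop holds iff some offset still to be visited puts j at a neighbour index.
theorem ringFoundA_iff (i n : Int) (hn : 0 < n) (j : Nat) (k : Int) : ∀ d : Int,
    ringFoundA i (j : Int) n k d = true ↔
      ∃ x ∈ PySem.List.pyRange d (k + 1) 1,
        (PySem.Int.mod (i - x) n).toNat = j ∨ (PySem.Int.mod (i + x) n).toNat = j := by
  intro d
  induction d using ringFoundA.induct i (j : Int) n k with
  | case1 d hd h =>
    have h1 := PySem.Int.mod_nonneg (i - d) hn
    have h2 := PySem.Int.mod_nonneg (i + d) hn
    rw [ringFoundA, dif_pos hd, if_pos h, PySem.List.pyRange_one_cons (by omega : d < k + 1)]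
    simp only [true_iff, List.mem_cons]
    exact ⟨d, Or.inl rfl, by omega⟩
  | case2 d hd h ih =>
    have h1 := PySem.Int.mod_nonneg (i - d) hn
    have h2 := PySem.Int.mod_nonneg (i + d) hn
    rw [ringFoundA, dif_pos hd, if_neg h, PySem.List.pyRange_one_cons (by omega : d < k + 1), ih]
    constructor
    · rintro ⟨x, hx, ho⟩; exact ⟨x, List.mem_cons_of_mem d hx, ho⟩
    · rintro ⟨x, hx, ho⟩
      rcases List.mem_cons.mp hx with hx | hx
      · subst hx
        rcases ho with ho | ho
        · exact absurd (Or.inl (by omega)) h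
        · exact absurd (Or.inr (by omega)) h
      · exact ⟨x, hx, ho⟩
  | case3 d hd =>
    rw [ringFoundA, dif_neg hd, PySem.List.pyRange_one_eq_nil (by omega : k + 1 ≤ d)]
    simp

-- Folding the two set-assignments over a list of offsets: entry j of the result is 1
-- exactly when some offset targets j, else the initial entry (all targets are in range).
theorem foldl_set2_eq_map (f g : Int → Nat) (m : Nat) (ds : List Int)
    (hf : ∀ d ∈ ds, f d < m) (hg : ∀ d ∈ ds, g d < m) :
    ∀ row : List Int, row.length = m →
      ds.foldl (fun r d => (r.set (f d) 1).set (g d) 1) row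
        = (List.range m).map (fun j => if ∃ d ∈ ds, f d = j ∨ g d = j then (1 : Int) else row.getD j 0) := by
  induction ds with
  | nil =>
    intro row hrow
    simp only [List.foldl_nil, List.not_mem_nil, false_and, exists_false, if_false]
    apply List.ext_getElem (by simp [hrow])
    intro j h1 h2
    simp only [List.getElem_map, List.getElem_range]
    rw [List.getD_eq_getElem row 0 (by simp_all)]
  | cons d rest ih =>
    intro row hrow
    simp only [List.foldl_cons]
    rw [ih (fun x hx => hf x (List.mem_cons_of_mem d hx))
          (fun x hx => hg x (List.mem_cons_of_mem d hx))
          _ (by simp [hrow])]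
    apply List.map_congr_left
    intro j hj
    have hjm : j < m := List.mem_range.mp hj
    by_cases hr : ∃ x ∈ rest, f x = j ∨ g x = j
    · have h2 : ∃ x ∈ d :: rest, f x = j ∨ g x = j := by
        obtain ⟨x, hx, ho⟩ := hr; exact ⟨x, List.mem_cons_of_mem d hx, ho⟩
      rw [if_pos hr, if_pos h2]
    · rw [if_neg hr]
      have hlen1 : ((row.set (f d) 1).set (g d) 1).length = m := by simp [hrow]
      rw [List.getD_eq_getElem _ 0 (by omega), List.getElem_set, List.getElem_set]
      by_cases hd : f d = j ∨ g d = j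
      · have : ∃ x ∈ d :: rest, f x = j ∨ g x = j := ⟨d, List.mem_cons_self, hd⟩
        simp only [this, if_true]
        rcases hd with hd | hd <;> simp [hd]
      · have hno : ¬ ∃ x ∈ d :: rest, f x = j ∨ g x = j := by
          rintro ⟨x, hx, ho⟩
          rcases List.mem_cons.mp hx with hx | hx
          · exact hd (hx ▸ ho)
          · exact hr ⟨x, hx, ho⟩
        push Not at hd
        rw [if_neg hno, if_neg hd.2, if_neg hd.1]
        rw [List.getD_eq_getElem row 0 (by omega)]

-- Shifting the dividend by a multiple of a positive divisor does not change the mod.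
theorem mod_shift (a n q : Int) (hn : 0 < n) :
    PySem.Int.mod (a + n * q) n = PySem.Int.mod a n := by
  rw [PySem.Int.mod_eq_emod_of_pos hn, PySem.Int.mod_eq_emod_of_pos hn]
  exact Int.add_mul_emod_self_left _ _ _

-- B's cap of the offsets at n is harmless: every offset in [1, k] marks the same pair of
-- indices as its reduction modulo n, which lies in [1, min k n].
theorem exists_offset_shrink (i n k : Int) (hn : 0 < n) (j : Nat) :
    (∃ d ∈ PySem.List.pyRange 1 (k + 1) 1,
        (PySem.Int.mod (i - d) n).toNat = j ∨ (PySem.Int.mod (i + d) n).toNat = j) ↔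
    (∃ d ∈ PySem.List.pyRange 1 (min k n + 1) 1,
        (PySem.Int.mod (i - d) n).toNat = j ∨ (PySem.Int.mod (i + d) n).toNat = j) := by
  constructor
  · rintro ⟨d, hd, ho⟩
    rw [PySem.List.mem_pyRange_one] at hd
    by_cases hdm : d ≤ min k n
    · exact ⟨d, PySem.List.mem_pyRange_one.mpr ⟨hd.1, by omega⟩, ho⟩
    · have hnk : min k n = n := by omega
      have hfm := PySem.Int.floordiv_mul_add_mod (d - 1) n
      have hmn := PySem.Int.mod_nonneg (d - 1) hn
      have hml := PySem.Int.mod_lt (d - 1) hn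
      set q := PySem.Int.floordiv (d - 1) n with hq
      set d' := PySem.Int.mod (d - 1) n + 1 with hd'
      set p := q * n with hp
      have hdd : d = q * n + d' := by omega
      have h1 : PySem.Int.mod (i + d) n = PySem.Int.mod (i + d') n := by
        rw [show i + d = (i + d') + n * q from by rw [hdd]; ring]
        exact mod_shift _ _ _ hn
      have h2 : PySem.Int.mod (i - d) n = PySem.Int.mod (i - d') n := by
        rw [show i - d = (i - d') + n * (-q) from by rw [hdd]; ring]
        exact mod_shift _ _ _ hn
      refine ⟨d', PySem.List.mem_pyRange_one.mpr ⟨by omega, by omega⟩, ?_⟩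
      rcases ho with ho | ho
      · exact Or.inl (h2 ▸ ho)
      · exact Or.inr (h1 ▸ ho)
  · rintro ⟨d, hd, ho⟩
    rw [PySem.List.mem_pyRange_one] at hd
    exact ⟨d, PySem.List.mem_pyRange_one.mpr ⟨hd.1, by omega⟩, ho⟩

-- The two programs build the same row for every agent i in range.
theorem row_eq (n k i : Int) (hn : 0 < n) :
    (PySem.List.pyRange 0 n 1).foldl (fun (neighbours : List Int) j =>
        if ringFoundA i j n k 1 then neighbours ++ [(1 : Int)]
        else neighbours ++ [0]) []
      = (PySem.List.pyRange 1 (min k n + 1) 1).foldl (fun row d =>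
          (row.set (PySem.Int.mod (i - d) n).toNat 1).set (PySem.Int.mod (i + d) n).toNat 1)
          (List.replicate n.toNat 0) := by
  have hA : (PySem.List.pyRange 0 n 1).foldl (fun neighbours j =>
      if ringFoundA i j n k 1 then neighbours ++ [1]
      else neighbours ++ [0]) []
      = (PySem.List.pyRange 0 n 1).map (fun j =>
          if ringFoundA i j n k 1 then (1 : Int) else 0) := by
    have hfun : (fun (neighbours : List Int) j =>
        if ringFoundA i j n k 1 then neighbours ++ [1]
        else neighbours ++ [0])
        = fun (neighbours : List Int) j => neighbours ++
            [if ringFoundA i j n k 1 then (1 : Int) else 0] := by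
      funext nb j; split_ifs <;> rfl
    rw [hfun, PySem.List.foldl_append_singleton_eq_map, List.nil_append]
  rw [hA, foldl_set2_eq_map _ _ n.toNat _
        (fun d _ => by have := PySem.Int.mod_lt (i - d) hn
                       have := PySem.Int.mod_nonneg (i - d) hn; omega)
        (fun d _ => by have := PySem.Int.mod_lt (i + d) hn
                       have := PySem.Int.mod_nonneg (i + d) hn; omega)
        _ (List.length_replicate)]
  rw [PySem.List.pyRange_one 0 n]
  rw [List.map_map]
  simp only [Int.sub_zero]
  apply List.map_congr_left
  intro j hj
  have hjm : j < n.toNat := List.mem_range.mp hj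
  simp only [Function.comp_apply, zero_add, List.getD_replicate, hjm]
  by_cases hfound : ringFoundA i (j : Int) n k 1 = true
  · rw [if_pos ((exists_offset_shrink i n k hn j).mp ((ringFoundA_iff i n hn j k 1).mp hfound))]
    simp [hfound]
  · have hno : ¬ ∃ d ∈ PySem.List.pyRange 1 (min k n + 1) 1,
        (PySem.Int.mod (i - d) n).toNat = j ∨ (PySem.Int.mod (i + d) n).toNat = j :=
      fun h => hfound ((ringFoundA_iff i n hn j k 1).mpr ((exists_offset_shrink i n k hn j).mpr h))
    rw [if_neg hno]
    simp [hfound]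

-- ===== VERDICT (by name: the statement is the Claim_ definition above) =====
theorem ring_graph_spec : Claim_equal_ring_graph := by
  intro n k _
  unfold Spec_ring_graph ring_graph ring_graph_alt
  rw [PySem.List.foldl_append_singleton_eq_map, PySem.List.foldl_append_singleton_eq_map,
      List.nil_append, List.nil_append]
  apply List.map_congr_left
  intro i hi
  have hn : 0 < n := by
    have := (PySem.List.mem_pyRange_one.mp hi); omega
  exact row_eq n k i hn
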